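-- pv_equiv track=rewrite | github.com/jorjao81/zh-anki-generator | src/anki_pleco_importer/epub_analyzer.py | compare_with_anki_collection
-- ===== SOURCE A (Python) =====
-- from typing import Dict, List, Set, NamedTuple, Optional, Tuple
--
-- def compare_with_anki_collection(
--     word_frequencies: Dict[str, int], anki_words: Set[str]
-- ) -> Tuple[Set[str], Dict[str, int]]:
--     """
--     Compare book vocabulary with Anki collection.
--
--     Args:
--         word_frequencies: Word frequency dictionary from book
--         anki_words: Set of words in Anki collection
--
--     Returns:
--         Tuple of (known_words, unknown_words_with_frequency)
--     """
--     known_words = set()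
--     unknown_words = {}
--
--     for word, freq in word_frequencies.items():
--         if word in anki_words:
--             known_words.add(word)
--         else:
--             unknown_words[word] = freq
--
--     return known_words, unknown_words
-- ===== SOURCE B (Python) =====
-- def compare_with_anki_collection(word_frequencies, anki_words):
--     """Copy the book dict, delete every Anki word from the copy (Anki-driven pass),
--     then recover the known words as the key-set difference."""
--     unknown_words = dict(word_frequencies)
--     for w in anki_words:
--         unknown_words.pop(w, None)
--     known_words = word_frequencies.keys() - unknown_words.keys()
--     return known_words, unknown_words
-- ===== Notes on version B (the rewrite author's own statement) =====
-- stated objective: alternative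
-- what changed: Instead of routing each book word into known/unknown in one loop, B copies the dict, runs a deletion pass driven by the Anki set (pop each Anki word from the copy), and recovers the known words as the key-set difference keys() - keys().
import Mathlib
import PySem

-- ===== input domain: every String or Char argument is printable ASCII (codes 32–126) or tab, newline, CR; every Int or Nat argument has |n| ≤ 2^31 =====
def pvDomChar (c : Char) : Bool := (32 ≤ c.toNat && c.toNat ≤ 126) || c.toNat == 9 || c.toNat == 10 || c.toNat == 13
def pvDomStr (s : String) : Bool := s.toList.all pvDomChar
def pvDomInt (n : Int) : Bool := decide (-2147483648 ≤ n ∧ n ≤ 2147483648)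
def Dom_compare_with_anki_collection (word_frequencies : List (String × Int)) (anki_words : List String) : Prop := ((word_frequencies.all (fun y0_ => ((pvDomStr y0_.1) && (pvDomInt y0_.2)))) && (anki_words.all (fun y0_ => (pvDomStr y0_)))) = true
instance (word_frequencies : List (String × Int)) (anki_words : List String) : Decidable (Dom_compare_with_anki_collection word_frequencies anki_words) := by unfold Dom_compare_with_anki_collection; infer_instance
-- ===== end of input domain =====

-- B inverts A's decomposition: instead of one routing loop over the book words, it copies the
-- dict, deletes every Anki word from the copy (a pass driven by the Anki set), and recovers the
-- known words as the key-set difference (objective: alternative decomposition, same cost).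

-- ===== PORT A =====
-- for word, freq in word_frequencies.items(): route into known_words (set) / unknown_words (dict)
def compare_with_anki_collection (word_frequencies : List (String × Int)) (anki_words : List String) : List String × (List (String × Int)) :=
  let res := word_frequencies.foldl
    (fun (st : PySem.Set String × PySem.Dict String Int) wf =>
      if anki_words.contains wf.1 then (PySem.Set.add st.1 wf.1, st.2)
      else (st.1, st.2.insert wf.1 wf.2))
    (PySem.Set.empty, PySem.Dict.empty)
  (res.1, res.2.items)

-- ===== PORT B =====
-- unknown_words = dict(word_frequencies); for w in anki_words: unknown_words.pop(w, None)
-- (pop with a default, result discarded, is exactly Dict.erase); known = keys() - keys()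
def compare_with_anki_collection_alt (word_frequencies : List (String × Int)) (anki_words : List String) : List String × (List (String × Int)) :=
  let unknown := anki_words.foldl (fun d w => d.erase w) (PySem.Dict.ofList word_frequencies)
  let known := PySem.Set.diff (PySem.Dict.ofList word_frequencies).keys unknown.keys
  (known, unknown.items)

-- ===== PRECONDITION & SPEC =====
def Spec_compare_with_anki_collection (word_frequencies : List (String × Int)) (anki_words : List String) (out : List String × (List (String × Int))) : Prop := out = compare_with_anki_collection_alt word_frequencies anki_words
instance (word_frequencies : List (String × Int)) (anki_words : List String) (out : List String × (List (String × Int))) : Decidable (Spec_compare_with_anki_collection word_frequencies anki_words out) := by unfold Spec_compare_with_anki_collection; infer_instance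

-- ===== CLAIM (what is proved, stated in full; the proofs are below) =====
def Claim_equal_compare_with_anki_collection : Prop := ∀ (word_frequencies : List (String × Int)) (anki_words : List String), Dom_compare_with_anki_collection word_frequencies anki_words → Spec_compare_with_anki_collection word_frequencies anki_words (compare_with_anki_collection word_frequencies anki_words)

-- ===== LEMMAS AND PROOFS =====

-- A's loop splits into an independent Set.add fold over the known keys and a Dict-insert fold over the unknown pairs.
theorem pv_loop_eq (anki_words : List String) :
    ∀ (wf : List (String × Int)) (s : PySem.Set String) (d : PySem.Dict String Int),
    wf.foldl
      (fun (st : PySem.Set String × PySem.Dict String Int) p =>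
        if anki_words.contains p.1 then (PySem.Set.add st.1 p.1, st.2)
        else (st.1, st.2.insert p.1 p.2)) (s, d) =
    (((wf.map Prod.fst).filter (fun w => anki_words.contains w)).foldl PySem.Set.add s,
     (wf.filter (fun p => !anki_words.contains p.1)).foldl (fun d p => d.insert p.1 p.2) d) := by
  intro wf
  induction wf with
  | nil => intro s d; simp
  | cons q rest ih =>
    intro s d
    by_cases h : q.1 ∈ anki_words
    · have hb : anki_words.contains q.1 = true := by simpa using h
      rw [List.foldl_cons, if_pos hb, ih]
      simp [h]
    · rw [List.foldl_cons, if_neg (by simpa using h), ih]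
      simp [h]

-- filtering commutes with the dedup fold that builds a PySem.Set
theorem pv_filter_foldl_add (p : String → Bool) :
    ∀ (l : List String) (s : PySem.Set String),
    (l.foldl PySem.Set.add s).filter p = (l.filter p).foldl PySem.Set.add (s.filter p) := by
  intro l
  induction l with
  | nil => intro s; simp
  | cons x rest ih =>
    intro s
    by_cases hc : x ∈ s
    · have hc' : PySem.Set.add s x = s := by simp [PySem.Set.add, hc]
      by_cases hp : p x
      · have hx : PySem.Set.add (List.filter p s) x = List.filter p s := by
          simp [PySem.Set.add, List.mem_filter, hc, hp]
        rw [List.foldl_cons, hc', List.filter_cons, if_pos hp, List.foldl_cons, hx, ih]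
      · rw [List.foldl_cons, hc', List.filter_cons, if_neg hp, ih]
    · have hc' : PySem.Set.add s x = s ++ [x] := by simp [PySem.Set.add, hc]
      by_cases hp : p x
      · have hx : PySem.Set.add (List.filter p s) x = List.filter p s ++ [x] := by
          simp [PySem.Set.add, List.mem_filter, hc]
        rw [List.foldl_cons, hc', List.filter_cons, if_pos hp, List.foldl_cons, hx, ih]
        simp [List.filter_append, hp]
      · rw [List.foldl_cons, hc', List.filter_cons, if_neg hp, ih]
        simp [List.filter_append, hp]

-- erasing every word of a list from a dict filters its items by key
theorem pv_erase_foldl (anki : List String) :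
    ∀ (d : PySem.Dict String Int),
    (anki.foldl (fun d w => d.erase w) d).items = d.items.filter (fun p => !anki.contains p.1) := by
  induction anki with
  | nil => intro d; simp
  | cons a rest ih =>
    intro d
    rw [List.foldl_cons, ih]
    show List.filter _ (List.filter _ d.items) = _
    rw [List.filter_filter]
    refine List.filter_congr ?_
    intro p _
    by_cases h : p.1 = a <;> simp [h, Bool.and_comm]

-- inserting one pair commutes with a key-only filter of the items
theorem pv_insert_filter (Pk : String → Bool) (d : PySem.Dict String Int) (k : String) (v : Int) :
    (d.insert k v).items.filter (fun p => Pk p.1) =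
      if Pk k then ((PySem.Dict.mk (d.items.filter (fun p => Pk p.1))).insert k v).items
      else d.items.filter (fun p => Pk p.1) := by
  have hupd : ∀ p : String × Int,
      Pk ((if p.1 == k then (k, v) else p).1) = Pk p.1 := by
    intro p
    by_cases h : p.1 = k
    · simp [h]
    · simp [h, beq_iff_eq]
  by_cases hc : d.contains k = true
  · have hmap : (d.insert k v).items
        = d.items.map (fun p => if p.1 == k then (k, v) else p) := by
      simp [PySem.Dict.insert, hc]
    have hfm : (d.items.map (fun p => if p.1 == k then (k, v) else p)).filter (fun p => Pk p.1)
        = (d.items.filter (fun p => Pk p.1)).map (fun p => if p.1 == k then (k, v) else p) := by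
      rw [List.filter_map]
      congr 1
      exact List.filter_congr (fun p _ => hupd p)
    by_cases hp : Pk k = true
    · -- the filtered dict still contains k
      have hck : (PySem.Dict.mk (d.items.filter (fun p => Pk p.1))).contains k = true := by
        simp only [PySem.Dict.contains] at hc ⊢
        simp only [List.any_eq_true, List.mem_filter] at hc ⊢
        obtain ⟨p, hmem, hbeq⟩ := hc
        exact ⟨p, ⟨hmem, by rw [show p.1 = k from by simpa [beq_iff_eq] using hbeq]; exact hp⟩, hbeq⟩
      rw [hmap, hfm, if_pos hp]
      simp [PySem.Dict.insert, hck]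
    · have hp' : Pk k = false := by simpa using hp
      rw [hmap, hfm, if_neg hp]
      refine Eq.trans ?_ (List.map_id _)
      refine List.map_congr_left ?_
      intro p hmem
      have hPp : Pk p.1 = true := (List.mem_filter.mp hmem).2
      have : ¬ (p.1 = k) := fun h => by rw [h] at hPp; exact absurd hPp (by simp [hp'])
      simp [this, beq_iff_eq]
  · have happ : (d.insert k v).items = d.items ++ [(k, v)] := by
      simp [PySem.Dict.insert, hc]
    have hck : (PySem.Dict.mk (d.items.filter (fun p => Pk p.1))).contains k = false := by
      rw [Bool.eq_false_iff]
      intro h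
      apply hc
      simp only [PySem.Dict.contains, List.any_eq_true, List.mem_filter] at h ⊢
      obtain ⟨p, ⟨hm, _⟩, hb⟩ := h
      exact ⟨p, hm, hb⟩
    by_cases hp : Pk k = true
    · rw [happ, List.filter_append, if_pos hp]
      simp [PySem.Dict.insert, hck, hp]
    · have hp' : Pk k = false := by simpa using hp
      rw [happ, List.filter_append, if_neg hp]
      simp [hp']

-- an insert fold (dict(...) construction) commutes with a key-only filter of the items
theorem pv_update_filter (Pk : String → Bool) :
    ∀ (wf : List (String × Int)) (d : PySem.Dict String Int),
    ((wf.foldl (fun d p => d.insert p.1 p.2) d).items).filter (fun p => Pk p.1) =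
      ((wf.filter (fun p => Pk p.1)).foldl (fun d p => d.insert p.1 p.2)
        (PySem.Dict.mk (d.items.filter (fun p => Pk p.1)))).items := by
  intro wf
  induction wf with
  | nil => intro d; simp
  | cons q rest ih =>
    intro d
    rw [List.foldl_cons, ih, List.filter_cons]
    by_cases hp : Pk q.1 = true
    · rw [if_pos hp, List.foldl_cons]
      congr 2
      rw [pv_insert_filter, if_pos hp]
    · rw [if_neg (by simpa using hp)]
      congr 2
      rw [pv_insert_filter, if_neg (by simpa using hp)]

-- keys of dict(word_frequencies) = first-occurrence dedup of the key list
theorem pv_keys_ofList (wf : List (String × Int)) :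
    (PySem.Dict.ofList wf).keys = PySem.Set.ofList (wf.map Prod.fst) := by
  show (wf.foldl (fun d p => d.insert p.1 p.2) PySem.Dict.empty).keys = _
  rw [show (fun (d : PySem.Dict String Int) (p : String × Int) => d.insert p.1 p.2)
        = (fun d p => d.insert (Prod.fst p) ((fun (_ : PySem.Dict String Int) (x : String × Int) => x.2) d p)) from rfl,
      PySem.Dict.keys_foldl_insert_key]
  rfl

-- ===== VERDICT (by name: the statement is the Claim_ definition above) =====
theorem compare_with_anki_collection_spec : Claim_equal_compare_with_anki_collection := by
  intro wf anki _
  show compare_with_anki_collection wf anki = compare_with_anki_collection_alt wf anki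
  simp only [compare_with_anki_collection, compare_with_anki_collection_alt, pv_loop_eq]
  have hunk : (anki.foldl (fun d w => d.erase w) (PySem.Dict.ofList wf)).items
      = ((wf.filter (fun p => !anki.contains p.1)).foldl (fun d p => d.insert p.1 p.2)
          PySem.Dict.empty).items := by
    rw [pv_erase_foldl]
    have := pv_update_filter (fun k => !anki.contains k) wf PySem.Dict.empty
    simpa using this
  have hknown : PySem.Set.diff (PySem.Dict.ofList wf).keys
        (anki.foldl (fun d w => d.erase w) (PySem.Dict.ofList wf)).keys
      = ((wf.map Prod.fst).filter (fun w => anki.contains w)).foldl PySem.Set.add PySem.Set.empty := by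
    have hK : (anki.foldl (fun d w => d.erase w) (PySem.Dict.ofList wf)).keys
        = ((PySem.Dict.ofList wf).items.filter (fun p => !anki.contains p.1)).map Prod.fst := by
      rw [PySem.Dict.keys, pv_erase_foldl]
    rw [PySem.Set.diff, hK]
    have hcongr : ∀ k ∈ (PySem.Dict.ofList wf).keys,
        (!PySem.Set.contains (((PySem.Dict.ofList wf).items.filter (fun p => !anki.contains p.1)).map Prod.fst) k)
          = anki.contains k := by
      intro k hk
      rw [PySem.Set.contains_eq_listContains]
      by_cases hmem : k ∈ anki
      · have ha : anki.contains k = true := by simpa using hmem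
        rw [ha, Bool.not_eq_true', Bool.eq_false_iff]
        intro h
        obtain ⟨p, hpf, hpk⟩ := List.mem_map.mp
          (by simpa only [List.contains_eq_mem, decide_eq_true_eq] using h)
        have hfp := (List.mem_filter.mp hpf).2
        rw [hpk] at hfp
        simp [hmem] at hfp
      · have ha' : anki.contains k = false := by simpa using hmem
        rw [ha', Bool.not_eq_false']
        obtain ⟨p, hpmem, hpk⟩ := List.mem_map.mp (by simpa only [PySem.Dict.keys, List.mem_map] using hk)
        have hmm : k ∈ ((PySem.Dict.ofList wf).items.filter (fun p => !anki.contains p.1)).map Prod.fst :=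
          List.mem_map.mpr ⟨p, List.mem_filter.mpr ⟨hpmem, by rw [hpk]; simpa using hmem⟩, hpk⟩
        simpa only [List.contains_eq_mem, decide_eq_true_eq] using hmm
    rw [List.filter_congr hcongr, pv_keys_ofList, PySem.Set.ofList_eq_foldl,
        pv_filter_foldl_add]
    rfl
  exact Prod.ext hknown.symm hunk.symm
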